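-- pv_equiv track=rewrite | github.com/lockephi/Allentown-L104-Node | l104_invention_lab.py | strange_loop_detect
-- ===== SOURCE A (Python) =====
-- from typing import List, Dict, Any, Callable, Tuple, Optional
--
-- def strange_loop_detect(sequence: List[Any], max_period: int = 10) -> Optional[int]:
--     """
--     Detect strange loops / cycles in a sequence.
--     Returns period if found, None otherwise.
--     """
--     n = len(sequence)
--
--     for period in range(1, min(max_period + 1, n // 2)):
--         is_periodic = True
--         for i in range(n - period):
--             if sequence[i] != sequence[i + period]:
--                 is_periodic = False
--                 break
--         if is_periodic:
--             return period
--
--     return None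
-- ===== SOURCE B (Python) =====
-- def strange_loop_detect(sequence, max_period=10):
--     """One pass over the sequence, maintaining the list of surviving candidate
--     periods, instead of re-scanning the whole sequence for each period."""
--     n = len(sequence)
--     alive = list(range(1, min(max_period + 1, n // 2)))
--     for i, x in enumerate(sequence):
--         alive = [p for p in alive if i + p >= n or x == sequence[i + p]]
--     return alive[0] if alive else None
-- ===== Notes on version B (the rewrite author's own statement) =====
-- stated objective: alternative
-- what changed: Instead of trying each period in turn and rescanning the whole sequence for it (nested loops with early break), B makes a single pass over the sequence maintaining the list of still-surviving candidate periods as a filter, and returns the smallest survivor.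
import Mathlib
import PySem

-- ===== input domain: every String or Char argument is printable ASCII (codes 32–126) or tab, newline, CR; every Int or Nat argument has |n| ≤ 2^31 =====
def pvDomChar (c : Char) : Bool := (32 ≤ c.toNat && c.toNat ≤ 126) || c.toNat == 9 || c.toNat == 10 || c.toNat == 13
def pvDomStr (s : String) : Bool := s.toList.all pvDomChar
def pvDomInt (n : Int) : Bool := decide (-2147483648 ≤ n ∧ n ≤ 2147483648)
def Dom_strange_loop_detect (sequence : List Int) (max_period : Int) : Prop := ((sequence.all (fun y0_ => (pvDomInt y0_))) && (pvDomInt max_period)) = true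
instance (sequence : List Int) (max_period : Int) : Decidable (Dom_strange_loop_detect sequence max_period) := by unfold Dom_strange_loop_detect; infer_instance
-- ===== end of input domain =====

-- B replaces A's nested period-by-period rescans with a single pass over the
-- sequence that filters a maintained list of surviving candidate periods
-- (objective: alternative; same worst-case cost).

-- ===== PORT A =====
-- inner loop: for i in range(n - period): if sequence[i] != sequence[i + period]: is_periodic = False; break
def aCheck (sequence : List Int) (period : Int) : List Int → Bool
  | [] => true
  | i :: rest =>
    if PySem.List.pyGet? sequence i ≠ PySem.List.pyGet? sequence (i + period) then false
    else aCheck sequence period rest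

-- outer loop: for period in range(1, min(max_period + 1, n // 2)): … if is_periodic: return period
def aOuter (sequence : List Int) (n : Int) : List Int → Option Int
  | [] => none
  | p :: rest =>
    if aCheck sequence p (PySem.List.pyRange 0 (n - p) 1) then some p
    else aOuter sequence n rest

def strange_loop_detect (sequence : List Int) (max_period : Int) : Option Int :=
  let n : Int := sequence.length
  aOuter sequence n (PySem.List.pyRange 1 (min (max_period + 1) (PySem.Int.floordiv n 2)) 1)

-- ===== PORT B =====
def strange_loop_detect_alt (sequence : List Int) (max_period : Int) : Option Int :=
  let n : Int := sequence.length
  let alive0 := PySem.List.pyRange 1 (min (max_period + 1) (PySem.Int.floordiv n 2)) 1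
  let alive := (PySem.List.enumerate sequence 0).foldl
    (fun al ix => al.filter
      (fun p => decide (n ≤ ix.1 + p) || decide (some ix.2 = PySem.List.pyGet? sequence (ix.1 + p)))) alive0
  alive.head?

-- ===== PRECONDITION & SPEC =====
def Spec_strange_loop_detect (sequence : List Int) (max_period : Int) (out : Option Int) : Prop := out = strange_loop_detect_alt sequence max_period
instance (sequence : List Int) (max_period : Int) (out : Option Int) : Decidable (Spec_strange_loop_detect sequence max_period out) := by unfold Spec_strange_loop_detect; infer_instance

-- ===== CLAIM (what is proved, stated in full; the proofs are below) =====
def Claim_equal_strange_loop_detect : Prop := ∀ (sequence : List Int) (max_period : Int), Dom_strange_loop_detect sequence max_period → Spec_strange_loop_detect sequence max_period (strange_loop_detect sequence max_period)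

-- ===== LEMMAS AND PROOFS =====

-- Bool.all congruence under membership (no library lemma closes it; proved by induction)
theorem all_congr_mem {α : Type} {l : List α} {f g : α → Bool} (h : ∀ x ∈ l, f x = g x) :
    l.all f = l.all g := by
  induction l with
  | nil => rfl
  | cons a t ih => simp_all

-- A's outer loop returns the head of the filtered candidate list
theorem aOuter_eq_head (sequence : List Int) (n : Int) (ps : List Int) :
    aOuter sequence n ps
      = (ps.filter (fun p => aCheck sequence p (PySem.List.pyRange 0 (n - p) 1))).head? := by
  induction ps with
  | nil => rfl
  | cons p rest ih =>
    simp only [aOuter, List.filter_cons]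
    by_cases h : aCheck sequence p (PySem.List.pyRange 0 (n - p) 1)
    · simp [h]
    · simp [h, ih]

-- folding a filter over a list of events = one filter by the conjunction of all tests
theorem foldl_filter_eq_filter_all {α β : Type} (es : List β) (l : List α) (q : β → α → Bool) :
    es.foldl (fun al e => al.filter (q e)) l = l.filter (fun p => es.all (fun e => q e p)) := by
  induction es generalizing l with
  | nil => simp
  | cons e rest ih =>
    simp only [List.foldl_cons, ih, List.filter_filter, List.all_cons]
    exact List.filter_congr (fun x _ => by rw [Bool.and_comm])

-- A's early-break inner loop is an 'all' over the same index list
theorem aCheck_eq_all (sequence : List Int) (period : Int) (l : List Int) :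
    aCheck sequence period l
      = l.all (fun i => PySem.List.pyGet? sequence i == PySem.List.pyGet? sequence (i + period)) := by
  induction l with
  | nil => rfl
  | cons i rest ih =>
    simp only [aCheck, List.all_cons]
    by_cases h : PySem.List.pyGet? sequence i = PySem.List.pyGet? sequence (i + period)
    · simp [h, ih]
    · simp [h]

-- pointwise agreement of the two per-period tests, for 1 ≤ p ≤ n
theorem tests_agree (s : List Int) (p : Int) (hp1 : 1 ≤ p) (hpn : p ≤ (s.length : Int)) :
    aCheck s p (PySem.List.pyRange 0 ((s.length : Int) - p) 1)
      = (PySem.List.enumerate s 0).all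
          (fun ix => decide ((s.length : Int) ≤ ix.1 + p) || decide (some ix.2 = PySem.List.pyGet? s (ix.1 + p))) := by
  set n : Int := (s.length : Int) with hn
  rw [aCheck_eq_all, PySem.List.enumerate_eq_map_pyRange s 0, List.all_map]
  rw [show PySem.List.pyRange 0 (PySem.List.len s) 1
        = PySem.List.pyRange 0 (n - p) 1 ++ PySem.List.pyRange (n - p) n 1 from by
      rw [PySem.List.len_eq, ← hn]
      exact PySem.List.pyRange_one_append 0 (n - p) n (by omega) (by omega)]
  rw [List.all_append]
  have h2 : (PySem.List.pyRange (n - p) n 1).all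
      ((fun ix => decide (n ≤ ix.1 + p) || decide (some ix.2 = PySem.List.pyGet? s (ix.1 + p))) ∘
        fun j => (j, PySem.List.pyGetD s j 0)) = true := by
    rw [List.all_eq_true]
    intro j hj
    have := (PySem.List.mem_pyRange_one).1 hj
    simp only [Function.comp_apply, Bool.or_eq_true, decide_eq_true_eq]
    left; omega
  rw [h2, Bool.and_true]
  refine all_congr_mem ?_
  intro j hj
  have hjm := (PySem.List.mem_pyRange_one).1 hj
  have hj0 : 0 ≤ j := hjm.1
  have hjlt : j < n - p := hjm.2
  have hnot : ¬ (n ≤ j + p) := by omega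
  have hget : PySem.List.pyGet? s j = some (PySem.List.pyGetD s j 0) := by
    rcases Int.eq_ofNat_of_zero_le hj0 with ⟨k, rfl⟩
    have hk : k < s.length := by omega
    simp [PySem.List.pyGetD_natCast, hk, List.getD_eq_getElem?_getD]
  simp only [Function.comp_apply, hnot, decide_false, Bool.false_or]
  rw [← hget]
  rcases h : PySem.List.pyGet? s j with _ | v <;> rcases h2 : PySem.List.pyGet? s (j + p) with _ | w <;>
    simp [Bool.beq_eq_decide_eq]

-- ===== VERDICT (by name: the statement is the Claim_ definition above) =====
theorem strange_loop_detect_spec : Claim_equal_strange_loop_detect := by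
  intro s mp _
  unfold Spec_strange_loop_detect strange_loop_detect strange_loop_detect_alt
  simp only []
  rw [aOuter_eq_head, foldl_filter_eq_filter_all]
  congr 1
  refine List.filter_congr ?_
  intro p hp
  have hpm := (PySem.List.mem_pyRange_one).1 hp
  have hp1 : 1 ≤ p := hpm.1
  have hpn : p ≤ (s.length : Int) := by
    have h2 : p < PySem.Int.floordiv (s.length : Int) 2 := lt_of_lt_of_le hpm.2 (min_le_right _ _)
    have := PySem.Int.floordiv_eq_ediv_of_pos (a := (s.length : Int)) (b := 2) (by omega)
    have hle : (s.length : Int) / 2 ≤ (s.length : Int) := by omega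
    omega
  exact tests_agree s p hp1 hpn
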